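-- pv_equiv track=rewrite | github.com/jensfr1/mcpdata | agents/emma.py | extract_analysis_suggestions
-- ===== SOURCE A (Python) =====
-- def extract_analysis_suggestions(ai_insights):
--     """
--     Extracts analysis suggestions from the AI insights
--
--     Args:
--         ai_insights: The AI-generated insights
--
--     Returns:
--         A list of analysis suggestions
--     """
--     # Common analysis types to look for
--     analysis_types = [
--         "clustering",
--         "segmentation",
--         "regression",
--         "classification",
--         "time series",
--         "correlation",
--         "trend analysis",
--         "anomaly detection",
--         "predictive modeling",
--         "cohort analysis"
--     ]
--
--     # Extract suggestions that mention these analysis types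
--     suggestions = []
--
--     for analysis_type in analysis_types:
--         if analysis_type in ai_insights.lower():
--             # Find the sentence containing this analysis type
--             sentences = ai_insights.split('.')
--             for sentence in sentences:
--                 if analysis_type in sentence.lower():
--                     suggestions.append(sentence.strip())
--                     break
--
--     # If no specific analysis types were found, return a generic suggestion
--     if not suggestions:
--         suggestions = ["Consider exploratory data analysis to identify patterns and relationships."]
--
--     return suggestions
-- ===== SOURCE B (Python) =====
-- def extract_analysis_suggestions(ai_insights):
--     """
--     Extracts analysis suggestions from the AI insights
--
--     Single pass over the sentences: index each analysis type by the first
--     sentence that mentions it, then emit in analysis-type order.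
--     """
--     analysis_types = [
--         "clustering",
--         "segmentation",
--         "regression",
--         "classification",
--         "time series",
--         "correlation",
--         "trend analysis",
--         "anomaly detection",
--         "predictive modeling",
--         "cohort analysis",
--     ]
--
--     sentences = ai_insights.split('.')
--
--     first_hit = {}
--     for sentence in sentences:
--         sentence_l = sentence.lower()
--         for analysis_type in analysis_types:
--             if analysis_type in sentence_l and analysis_type not in first_hit:
--                 first_hit[analysis_type] = sentence.strip()
--
--     suggestions = [first_hit[t] for t in analysis_types if t in first_hit]
--
--     if not suggestions:
--         return ["Consider exploratory data analysis to identify patterns and relationships."]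
--     return suggestions
-- ===== Notes on version B (the rewrite author's own statement) =====
-- stated objective: faster
-- what changed: Inverted the nesting: instead of re-splitting the text and rescanning all sentences for each of the 10 analysis types, B splits once and makes a single pass over the sentences, recording in a dict the first (stripped) sentence per type, then emits results in analysis-type order.
import Mathlib
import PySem

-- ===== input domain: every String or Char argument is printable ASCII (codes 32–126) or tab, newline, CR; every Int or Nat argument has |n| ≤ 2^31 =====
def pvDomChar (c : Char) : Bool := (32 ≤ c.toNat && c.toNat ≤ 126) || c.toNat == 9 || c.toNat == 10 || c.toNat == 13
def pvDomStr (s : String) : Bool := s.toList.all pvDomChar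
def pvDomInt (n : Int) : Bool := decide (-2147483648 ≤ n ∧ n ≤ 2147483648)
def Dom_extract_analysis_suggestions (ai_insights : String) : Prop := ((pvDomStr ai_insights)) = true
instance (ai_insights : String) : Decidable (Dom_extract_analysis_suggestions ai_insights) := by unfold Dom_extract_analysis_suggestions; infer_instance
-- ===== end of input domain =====

-- ===== PORT A =====
-- B changes only the loop structure (one indexing pass over the sentences instead of
-- per-type rescans); return values are proved equal on the whole printable-ASCII domain.
-- The analysis-type list literal both Pythons carry verbatim.
def pvAnalysisTypes : List String :=
  ["clustering", "segmentation", "regression", "classification", "time series",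
   "correlation", "trend analysis", "anomaly detection", "predictive modeling",
   "cohort analysis"]

-- inner 'for sentence in sentences: … break' of A (append first matching sentence, stripped)
def pvFirstSentLoop (t : String) (sentences : List String) (acc : List String) : List String :=
  match sentences with
  | [] => acc
  | s :: rest =>
      if PySem.Str.isIn t (PySem.Str.lower s) then acc ++ [PySem.Str.strip s]
      else pvFirstSentLoop t rest acc

def extract_analysis_suggestions (ai_insights : String) : List String :=
  let analysis_types := pvAnalysisTypes
  let suggestions := analysis_types.foldl (fun acc analysis_type =>
    if PySem.Str.isIn analysis_type (PySem.Str.lower ai_insights) then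
      match PySem.Str.split? ai_insights "." with  -- '.' is non-empty: never none
      | some sentences => pvFirstSentLoop analysis_type sentences acc
      | none => acc
    else acc) []
  if suggestions = [] then
    ["Consider exploratory data analysis to identify patterns and relationships."]
  else suggestions

-- ===== PORT B =====
def extract_analysis_suggestions_alt (ai_insights : String) : List String :=
  let analysis_types := pvAnalysisTypes
  let sentences := match PySem.Str.split? ai_insights "." with  -- '.' is non-empty: never none
    | some ss => ss
    | none => []
  let first_hit : PySem.Dict String String := sentences.foldl (fun d sentence =>
    let sentence_l := PySem.Str.lower sentence
    analysis_types.foldl (fun d analysis_type =>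
      if PySem.Str.isIn analysis_type sentence_l && !(d.contains analysis_type) then
        d.insert analysis_type (PySem.Str.strip sentence)
      else d) d) PySem.Dict.empty
  let suggestions := analysis_types.foldl (fun acc t =>
    match first_hit.get? t with
    | some v => acc ++ [v]
    | none => acc) []
  if suggestions = [] then
    ["Consider exploratory data analysis to identify patterns and relationships."]
  else suggestions

-- ===== PRECONDITION & SPEC =====
def Spec_extract_analysis_suggestions (ai_insights : String) (out : List String) : Prop := out = extract_analysis_suggestions_alt ai_insights
instance (ai_insights : String) (out : List String) : Decidable (Spec_extract_analysis_suggestions ai_insights out) := by unfold Spec_extract_analysis_suggestions; infer_instance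

-- ===== CLAIM (what is proved, stated in full; the proofs are below) =====
def Claim_equal_extract_analysis_suggestions : Prop := ∀ (ai_insights : String), Dom_extract_analysis_suggestions ai_insights → Spec_extract_analysis_suggestions ai_insights (extract_analysis_suggestions ai_insights)

-- ===== LEMMAS AND PROOFS =====

-- every piece of splitOn is a contiguous substring of the original
theorem pv_splitOn_go_infix (sep : List Char) (s0 : List Char) :
    ∀ (fuel : Nat) (l cur : List Char) (acc : List (List Char)),
      (∀ a ∈ acc, a <:+: s0) → (cur.reverse ++ l) <:+: s0 →
      ∀ x ∈ PySem.Chars.splitOn.go sep fuel l cur acc, x <:+: s0 := by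
  intro fuel
  induction fuel with
  | zero =>
      intro l cur acc hacc hcur x hx
      rw [PySem.Chars.splitOn.go.eq_def] at hx
      simp only [List.mem_reverse, List.mem_cons] at hx
      rcases hx with h | h
      · exact h ▸ hcur
      · exact hacc x h
  | succ fuel ih =>
      intro l cur acc hacc hcur x hx
      rw [PySem.Chars.splitOn.go.eq_def] at hx
      match l, hx with
      | [], hx =>
          simp only [List.mem_reverse, List.mem_cons] at hx
          rcases hx with h | h
          · subst h
            exact (List.append_nil cur.reverse) ▸ hcur
          · exact hacc x h
      | c :: rest, hx =>
          simp only at hx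
          split at hx
          · refine ih _ _ _ ?_ ?_ x hx
            · intro a ha
              rcases List.mem_cons.mp ha with h | h
              · subst h
                exact List.IsInfix.trans ⟨[], c :: rest, by simp⟩ hcur
              · exact hacc a h
            · refine List.IsInfix.trans ?_ hcur
              refine List.IsInfix.trans (List.IsSuffix.isInfix (List.drop_suffix _ _)) ?_
              exact ⟨cur.reverse, [], by simp⟩
          · refine ih _ _ _ hacc ?_ x hx
            simpa using hcur

theorem pv_mem_splitOn_infix (s sep x : List Char) (hx : x ∈ PySem.Chars.splitOn s sep) :
    x <:+: s := by
  unfold PySem.Chars.splitOn at hx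
  exact pv_splitOn_go_infix sep s _ s [] [] (by simp) (by simp) x hx

-- A's inner loop as a find?
theorem pv_firstSentLoop_eq (t : String) (sentences : List String) (acc : List String) :
    pvFirstSentLoop t sentences acc =
      match sentences.find? (fun s => PySem.Str.isIn t (PySem.Str.lower s)) with
      | some s => acc ++ [PySem.Str.strip s]
      | none => acc := by
  induction sentences with
  | nil => rfl
  | cons s rest ih =>
      simp only [pvFirstSentLoop, List.find?_cons]
      by_cases h : PySem.Str.isIn t (PySem.Str.lower s) = true
      · simp only [PySem.Str.isIn_eq, PySem.Str.toList_lower] at h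
        simp [h]
      · simp only [Bool.not_eq_true] at h
        simp only [PySem.Str.isIn_eq, PySem.Str.toList_lower] at h
        simp [h, ih]

-- the sentence list both ports use
def pvSentences (ai_insights : String) : List String :=
  match PySem.Str.split? ai_insights "." with
  | some ss => ss
  | none => []

theorem pv_sentences_toList (ai_insights : String) :
    (pvSentences ai_insights).map String.toList = PySem.Chars.splitOn ai_insights.toList ['.'] := by
  unfold pvSentences
  have h := PySem.Str.split?_map ai_insights "."
  cases hs : PySem.Str.split? ai_insights "." with
  | none =>
      rw [hs] at h
      simp [PySem.Chars.split?] at h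
  | some ss =>
      rw [hs] at h
      simp only [Option.map_some] at h
      simp [PySem.Chars.split?] at h
      simpa using h

-- if no sentence were scanned A would append nothing; when the whole-text test fails, no sentence matches
theorem pv_no_sentence_of_not_isIn (ai_insights t : String)
    (h : PySem.Str.isIn t (PySem.Str.lower ai_insights) = false) :
    (pvSentences ai_insights).find? (fun s => PySem.Str.isIn t (PySem.Str.lower s)) = none := by
  rw [List.find?_eq_none]
  intro s hs hpred
  have hmem : s.toList ∈ PySem.Chars.splitOn ai_insights.toList ['.'] := by
    rw [← pv_sentences_toList]
    exact List.mem_map_of_mem hs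
  have hinf : s.toList <:+: ai_insights.toList := pv_mem_splitOn_infix _ _ _ hmem
  have h1 : t.toList <:+: (PySem.Str.lower s).toList := (PySem.Str.isIn_iff_infix t _).mp hpred
  rw [PySem.Str.toList_lower] at h1
  have h2 : PySem.Chars.lower s.toList <:+: PySem.Chars.lower ai_insights.toList := by
    simpa [PySem.Chars.lower] using List.IsInfix.map PySem.Chars.lowerChar hinf
  have : PySem.Str.isIn t (PySem.Str.lower ai_insights) = true := by
    rw [PySem.Str.isIn_iff_infix, PySem.Str.toList_lower]
    exact h1.trans h2
  rw [h] at this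
  exact Bool.false_ne_true this

-- generic: a key not in the iterated list is untouched by the inner fold
theorem pv_innerFold_get?_notmem (s : String) (ts : List String) (d : PySem.Dict String String)
    (t : String) (ht : t ∉ ts) :
    (ts.foldl (fun d u =>
      if PySem.Str.isIn u (PySem.Str.lower s) && !(d.contains u) then d.insert u (PySem.Str.strip s) else d) d).get? t
    = d.get? t := by
  induction ts generalizing d with
  | nil => rfl
  | cons u rest ih =>
      have hut : t ≠ u := fun h => ht (h ▸ List.mem_cons_self)
      have hrest : t ∉ rest := fun h => ht (List.mem_cons_of_mem _ h)
      simp only [List.foldl_cons]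
      rw [ih _ hrest]
      split
      · exact PySem.Dict.get?_insert_of_ne d _ hut
      · rfl

-- inner fold: what one sentence contributes to key t
theorem pv_innerFold_get? (s : String) (ts : List String) (hnd : ts.Nodup) (d : PySem.Dict String String)
    (t : String) (ht : t ∈ ts) :
    (ts.foldl (fun d u =>
      if PySem.Str.isIn u (PySem.Str.lower s) && !(d.contains u) then d.insert u (PySem.Str.strip s) else d) d).get? t
    = match d.get? t with
      | some v => some v
      | none => if PySem.Str.isIn t (PySem.Str.lower s) then some (PySem.Str.strip s) else none := by
  induction ts generalizing d with
  | nil => exact absurd ht (List.not_mem_nil)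
  | cons u rest ih =>
      simp only [List.foldl_cons]
      rcases List.mem_cons.mp ht with rfl | htr
      · have hrest : t ∉ rest := (List.nodup_cons.mp hnd).1
        rw [pv_innerFold_get?_notmem s rest _ t hrest]
        cases hd : d.get? t with
        | some v =>
            have hc : d.contains t = true := by
              rw [PySem.Dict.contains_eq_isSome_get?, hd]; rfl
            simp [hc, hd]
        | none =>
            have hc : d.contains t = false := by
              rw [PySem.Dict.contains_eq_isSome_get?, hd]; rfl
            by_cases hp : PySem.Str.isIn t (PySem.Str.lower s) = true
            · simp only [PySem.Str.isIn_eq, PySem.Str.toList_lower] at hp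
              simp [hc, hp]
            · simp only [Bool.not_eq_true] at hp
              simp only [PySem.Str.isIn_eq, PySem.Str.toList_lower] at hp
              simp [hc, hd, hp]
      · have hnd' : rest.Nodup := (List.nodup_cons.mp hnd).2
        have hut : t ≠ u := fun h => (List.nodup_cons.mp hnd).1 (h ▸ htr)
        have hstep : (if (PySem.Str.isIn u (PySem.Str.lower s) && !(d.contains u)) = true
              then d.insert u (PySem.Str.strip s) else d).get? t = d.get? t := by
          split
          · exact PySem.Dict.get?_insert_of_ne d _ hut
          · rfl
        rw [ih hnd' _ htr, hstep]

-- outer fold: the dict indexes each type by its first matching sentence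
theorem pv_dict_get? (ss : List String) (d : PySem.Dict String String) (t : String)
    (ht : t ∈ pvAnalysisTypes) :
    (ss.foldl (fun d sentence =>
      let sentence_l := PySem.Str.lower sentence
      pvAnalysisTypes.foldl (fun d analysis_type =>
        if PySem.Str.isIn analysis_type sentence_l && !(d.contains analysis_type) then
          d.insert analysis_type (PySem.Str.strip sentence)
        else d) d) d).get? t
    = match d.get? t with
      | some v => some v
      | none => (ss.find? (fun s => PySem.Str.isIn t (PySem.Str.lower s))).map PySem.Str.strip := by
  have hnd : pvAnalysisTypes.Nodup := by decide
  induction ss generalizing d with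
  | nil => cases hd : d.get? t <;> simp [hd]
  | cons s rest ih =>
      simp only [List.foldl_cons]
      rw [ih _]
      rw [pv_innerFold_get? s pvAnalysisTypes hnd d t ht]
      cases hd : d.get? t with
      | some v => simp
      | none =>
          by_cases hp : PySem.Str.isIn t (PySem.Str.lower s) = true
          · simp only [PySem.Str.isIn_eq, PySem.Str.toList_lower] at hp
            simp [hp]
          · simp only [Bool.not_eq_true] at hp
            simp only [PySem.Str.isIn_eq, PySem.Str.toList_lower] at hp
            simp [hp]

-- ===== VERDICT (by name: the statement is the Claim_ definition above) =====
theorem extract_analysis_suggestions_spec : Claim_equal_extract_analysis_suggestions := by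
  intro ai _
  unfold Spec_extract_analysis_suggestions
  unfold extract_analysis_suggestions extract_analysis_suggestions_alt
  simp only []
  have hfold :
      pvAnalysisTypes.foldl (fun acc analysis_type =>
        if PySem.Str.isIn analysis_type (PySem.Str.lower ai) then
          match PySem.Str.split? ai "." with
          | some sentences => pvFirstSentLoop analysis_type sentences acc
          | none => acc
        else acc) [] =
      pvAnalysisTypes.foldl (fun acc t =>
        match ((pvSentences ai).foldl (fun d sentence =>
          let sentence_l := PySem.Str.lower sentence
          pvAnalysisTypes.foldl (fun d analysis_type =>
            if PySem.Str.isIn analysis_type sentence_l && !(d.contains analysis_type) then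
              d.insert analysis_type (PySem.Str.strip sentence)
            else d) d) PySem.Dict.empty).get? t with
        | some v => acc ++ [v]
        | none => acc) [] := by
    apply PySem.List.foldl_congr_mem
    intro acc t htmem
    rw [pv_dict_get? (pvSentences ai) PySem.Dict.empty t htmem, PySem.Dict.get?_empty]
    have hsent : (match PySem.Str.split? ai "." with
        | some sentences => pvFirstSentLoop t sentences acc
        | none => acc) = pvFirstSentLoop t (pvSentences ai) acc := by
      unfold pvSentences
      cases PySem.Str.split? ai "." <;> rfl
    by_cases hin : PySem.Str.isIn t (PySem.Str.lower ai) = true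
    · rw [if_pos hin, hsent, pv_firstSentLoop_eq]
      cases (pvSentences ai).find? (fun s => PySem.Str.isIn t (PySem.Str.lower s)) <;> rfl
    · simp only [Bool.not_eq_true] at hin
      have hin' := hin
      simp only [PySem.Str.isIn_eq, PySem.Str.toList_lower] at hin'
      rw [if_neg (by simp [hin']), pv_no_sentence_of_not_isIn ai t hin]
      rfl
  rw [hfold]
  rfl
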